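-- pv_equiv track=rewrite | github.com/Chavez0296/python | unitTwosessionTwo.py | count_endangered_species
-- ===== SOURCE A (Python) =====
-- def count_endangered_species(endangered_species, observed_species):
--
--     check = set(endangered_species)
--     count = 0
--     for l in observed_species:
--         if l in check:
--             count += 1
--
--     return count
--     pass
-- ===== SOURCE B (Python) =====
-- def count_endangered_species(endangered_species, observed_species):
--     counts = {}
--     for s in observed_species:
--         counts[s] = counts.get(s, 0) + 1
--     return sum(counts.get(e, 0) for e in set(endangered_species))
-- ===== Notes on version B (the rewrite author's own statement) =====
-- stated objective: alternative
-- what changed: B tabulates observed occurrences in a frequency dict once and then sums the tallies over the distinct endangered species, instead of scanning observed and testing set membership per element.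
import Mathlib
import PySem

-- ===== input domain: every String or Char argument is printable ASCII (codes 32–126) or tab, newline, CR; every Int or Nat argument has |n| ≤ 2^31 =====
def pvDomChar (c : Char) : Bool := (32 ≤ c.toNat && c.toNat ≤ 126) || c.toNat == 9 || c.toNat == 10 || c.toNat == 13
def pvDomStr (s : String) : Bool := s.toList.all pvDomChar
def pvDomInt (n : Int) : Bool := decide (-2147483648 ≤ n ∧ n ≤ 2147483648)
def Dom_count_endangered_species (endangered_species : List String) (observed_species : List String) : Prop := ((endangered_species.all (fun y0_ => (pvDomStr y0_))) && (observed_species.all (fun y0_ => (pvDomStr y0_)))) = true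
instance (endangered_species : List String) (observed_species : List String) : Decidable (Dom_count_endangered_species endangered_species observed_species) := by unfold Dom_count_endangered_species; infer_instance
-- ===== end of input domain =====

-- B builds a frequency dict of observed_species once and sums the tallies over the
-- distinct endangered species (objective: alternative decomposition, same cost).


-- ===== PORT A =====
def count_endangered_species (endangered_species : List String) (observed_species : List String) : Int :=
  let check : PySem.Set String := PySem.Set.ofList endangered_species
  observed_species.foldl (fun count l => if PySem.Set.contains check l then count + 1 else count) 0

-- ===== PORT B =====
def count_endangered_species_alt (endangered_species : List String) (observed_species : List String) : Int :=
  let counts : PySem.Dict String Int :=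
    observed_species.foldl (fun d s => d.insert s (d.getD s 0 + 1)) PySem.Dict.empty
  (PySem.Set.ofList endangered_species).foldl (fun acc e => acc + counts.getD e 0) 0

-- ===== PRECONDITION & SPEC =====
def Spec_count_endangered_species (endangered_species : List String) (observed_species : List String) (out : Int) : Prop := out = count_endangered_species_alt endangered_species observed_species
instance (endangered_species : List String) (observed_species : List String) (out : Int) : Decidable (Spec_count_endangered_species endangered_species observed_species out) := by unfold Spec_count_endangered_species; infer_instance

-- ===== CLAIM (what is proved, stated in full; the proofs are below) =====
def Claim_equal_count_endangered_species : Prop := ∀ (endangered_species : List String) (observed_species : List String), Dom_count_endangered_species endangered_species observed_species → Spec_count_endangered_species endangered_species observed_species (count_endangered_species endangered_species observed_species)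

-- ===== LEMMAS AND PROOFS =====

-- A's loop computes countP (membership in endangered).
theorem foldl_count_mem (E O : List String) (c : Int) :
    O.foldl (fun count l => if PySem.Set.contains (PySem.Set.ofList E) l then count + 1 else count) c
      = c + (O.countP (fun l => decide (l ∈ E)) : Int) := by
  induction O generalizing c with
  | nil => simp
  | cons o O ih =>
      simp only [List.foldl_cons, List.countP_cons, ih]
      by_cases h : o ∈ E
      · simp only [PySem.Set.contains_iff, PySem.Set.mem_ofList, h, decide_true, if_pos]
        push_cast; ring
      · simp only [PySem.Set.contains_iff, PySem.Set.mem_ofList, h, decide_false, if_neg,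
          not_false_iff, Bool.false_eq_true, add_zero]

-- an accumulating fold of additions is the sum of the mapped list
theorem foldl_add_eq_sum (S : List String) (g : String → Int) (c : Int) :
    S.foldl (fun acc e => acc + g e) c = c + (S.map g).sum := by
  induction S generalizing c with
  | nil => simp
  | cons e S ih => simp [ih]; ring

-- the indicator sum over a list not containing o is 0
theorem ind_sum_zero (S : List String) (o : String) (h : o ∉ S) :
    (S.map (fun i => if o = i then (1 : Int) else 0)).sum = 0 := by
  induction S with
  | nil => simp
  | cons s S ih =>
      have h1 : ¬ o = s := fun hh => h (hh ▸ List.mem_cons_self ..)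
      have h2 : o ∉ S := fun hh => h (List.mem_cons_of_mem _ hh)
      simp [h1, ih h2]

-- indicator sum over a duplicate-free list
theorem ind_sum (S : List String) (o : String) (hS : S.Nodup) :
    (S.map (fun i => if o = i then (1 : Int) else 0)).sum = if o ∈ S then 1 else 0 := by
  induction S with
  | nil => simp
  | cons s S ih =>
      have hS' : S.Nodup := hS.of_cons
      have hns : s ∉ S := (List.nodup_cons.mp hS).1
      by_cases h : o = s
      · subst h
        simp [hns, ind_sum_zero S o hns]
      · simp [h, ih hS']

-- prepending one observation raises the tally sum by 1 exactly when it is in the (duplicate-free) key list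
theorem sum_count_cons (S O : List String) (o : String) (hS : S.Nodup) :
    (S.map (fun e => ((o :: O).count e : Int))).sum
      = (S.map (fun e => (O.count e : Int))).sum + (if o ∈ S then 1 else 0) := by
  simp [List.count_cons]
  rw [ind_sum S o hS]

-- summing counts over a duplicate-free list equals countP of membership
theorem sum_count_eq_countP (S O : List String) (hS : S.Nodup) :
    (S.map (fun e => (O.count e : Int))).sum = (O.countP (fun l => decide (l ∈ S)) : Int) := by
  induction O with
  | nil => simp
  | cons o O ih =>
      rw [sum_count_cons S O o hS, ih]
      simp only [List.countP_cons]
      by_cases h : o ∈ S <;> simp [h]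

-- B's counter dict reads back exact multiplicities
theorem counts_getD (O : List String) (e : String) :
    (O.foldl (fun d s => PySem.Dict.insert d s (PySem.Dict.getD d s 0 + 1)) PySem.Dict.empty).getD e 0
      = (O.count e : Int) := by
  rw [PySem.Dict.foldl_insert_getD_add_one_eq_counter, PySem.Dict.getD_counter]

-- ===== VERDICT (by name: the statement is the Claim_ definition above) =====
theorem count_endangered_species_spec : Claim_equal_count_endangered_species := by
  intro E O _
  unfold Spec_count_endangered_species count_endangered_species count_endangered_species_alt
  simp only []
  rw [foldl_count_mem, foldl_add_eq_sum]
  have h1 : ((PySem.Set.ofList E).map (fun e =>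
      ((O.foldl (fun d s => PySem.Dict.insert d s (PySem.Dict.getD d s 0 + 1)) PySem.Dict.empty).getD e 0)))
      = (PySem.Set.ofList E).map (fun e => (O.count e : Int)) := by
    apply List.map_congr_left; intro e _; exact counts_getD O e
  rw [h1, sum_count_eq_countP _ _ (PySem.Set.nodup_ofList E)]
  have h2 : (O.countP (fun l => decide (l ∈ PySem.Set.ofList E)))
      = O.countP (fun l => decide (l ∈ E)) := by
    apply List.countP_congr; intro l _; simp [PySem.Set.mem_ofList]
  rw [h2]
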